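-- pv_equiv track=rewrite | github.com/rogi-rogi/problem-solving | baekjoon-online-judge/gold/01016.py | SquareFreeInteger
-- ===== SOURCE A (Python) =====
-- def SquareFreeInteger(start, n = 0) :
--     if n == 0 : start, n = n, start
--     isSFI = [1] * (n - start + 1)
--     i = 2
--     while i * i <= n :
--         pow_prime = i * i
--         first_not_SFI = start // pow_prime * pow_prime
--         for j in range(first_not_SFI, n + 1, pow_prime) :
--             if j - start >= 0 :
--                 isSFI[j - start] = 0
--         i += 1
--     return isSFI
-- ===== SOURCE B (Python) =====
-- def SquareFreeInteger(start, n = 0):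
--     if n == 0:
--         start, n = n, start
--     # primes up to sqrt(n), by trial division against the earlier primes
--     primes = []
--     i = 2
--     while i * i <= n:
--         if all(i % p for p in primes):
--             primes.append(i)
--         i += 1
--     # every integer in [start, n] divisible by the square of a prime
--     bad = set()
--     for p in primes:
--         sq = p * p
--         first = -(-start // sq) * sq  # least multiple of sq that is >= start
--         for j in range(first, n + 1, sq):
--             bad.add(j)
--     return [0 if m in bad else 1 for m in range(start, n + 1)]
-- ===== Notes on version B (the rewrite author's own statement) =====
-- stated objective: alternative
-- what changed: Replaces A's mark-by-every-square sieve over a mutable array by a three-phase algorithm: collect the primes up to sqrt(n) by trial division, build a set of the multiples of each prime square in [start,n] (ceil-division start, no index arithmetic), and emit the answer as a membership comprehension.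
import Mathlib
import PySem

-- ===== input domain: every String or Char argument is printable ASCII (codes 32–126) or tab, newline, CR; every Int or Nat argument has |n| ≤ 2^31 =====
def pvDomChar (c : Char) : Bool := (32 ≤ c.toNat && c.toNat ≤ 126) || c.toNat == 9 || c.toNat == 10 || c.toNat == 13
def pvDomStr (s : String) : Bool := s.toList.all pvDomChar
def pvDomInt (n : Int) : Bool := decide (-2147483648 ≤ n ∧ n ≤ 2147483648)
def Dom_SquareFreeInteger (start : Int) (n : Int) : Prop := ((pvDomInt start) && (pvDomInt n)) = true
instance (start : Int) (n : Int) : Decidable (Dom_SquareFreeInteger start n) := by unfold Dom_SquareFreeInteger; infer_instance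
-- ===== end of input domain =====

-- B replaces A's mark-by-every-square sieve over a mutable array by a three-phase
-- algorithm: primes up to sqrt(n) by trial division, a set of the multiples of each
-- prime square in [start, n], and a membership comprehension (objective: alternative).

-- ===== PORT A =====
-- inner 'for j in range(first_not_SFI, n + 1, pow_prime)' loop of A
def pvAInner (start : Int) (n : Int) (p : Int) (isSFI : List Int) : List Int :=
  (PySem.List.pyRange (PySem.Int.floordiv start p * p) (n + 1) p).foldl
    (fun acc j => if 0 ≤ j - start then acc.set (j - start).toNat 0 else acc) isSFI

-- outer 'while i * i <= n' loop of A (fuel only makes the recursion structural; with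
-- fuel = n.toNat and i = 2 it never runs out before the guard i*i ≤ n fails)
def pvALoop (start : Int) (n : Int) (i : Int) (fuel : Nat) (isSFI : List Int) : List Int :=
  match fuel with
  | 0 => isSFI
  | fuel + 1 =>
    if i * i ≤ n then pvALoop start n (i + 1) fuel (pvAInner start n (i * i) isSFI)
    else isSFI

-- body of A after the argument swap
def pvABody (start : Int) (n : Int) : List Int :=
  pvALoop start n 2 n.toNat (List.replicate (n - start + 1).toNat 1)

def SquareFreeInteger (start : Int) (n : Int) : List Int :=
  if n = 0 then pvABody n start else pvABody start n

-- ===== PORT B =====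
-- B's prime-collection loop: 'while i * i <= n: if all(i % p for p in primes): primes.append(i)'
-- (fuel only makes the recursion structural; with fuel = n.toNat and i = 2 it never
-- runs out before the guard i*i ≤ n fails)
def pvBPrimes (n : Int) (i : Int) (fuel : Nat) (primes : List Int) : List Int :=
  match fuel with
  | 0 => primes
  | fuel + 1 =>
    if i * i ≤ n then
      pvBPrimes n (i + 1) fuel
        (if primes.all (fun p => !(decide (PySem.Int.mod i p = 0))) then primes ++ [i] else primes)
    else primes

-- B's bad-set construction: for each prime p, add every multiple of p*p in [start, n]
def pvBBad (start : Int) (n : Int) (primes : List Int) : PySem.Set Int :=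
  primes.foldl (fun bad p =>
    (PySem.List.pyRange (-(PySem.Int.floordiv (-start) (p * p)) * (p * p)) (n + 1) (p * p)).foldl
      (fun s j => PySem.Set.add s j) bad) PySem.Set.empty

-- body of B after the argument swap
def pvBBody (start : Int) (n : Int) : List Int :=
  let primes := pvBPrimes n 2 n.toNat []
  let bad := pvBBad start n primes
  (PySem.List.pyRange start (n + 1) 1).map (fun m => if m ∈ bad then 0 else 1)

def SquareFreeInteger_alt (start : Int) (n : Int) : List Int :=
  if n = 0 then pvBBody n start else pvBBody start n

-- ===== PRECONDITION & SPEC =====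
def Spec_SquareFreeInteger (start : Int) (n : Int) (out : List Int) : Prop := out = SquareFreeInteger_alt start n
instance (start : Int) (n : Int) (out : List Int) : Decidable (Spec_SquareFreeInteger start n out) := by unfold Spec_SquareFreeInteger; infer_instance

-- ===== CLAIM (what is proved, stated in full; the proofs are below) =====
def Claim_equal_SquareFreeInteger : Prop := ∀ (start : Int) (n : Int), Dom_SquareFreeInteger start n → Spec_SquareFreeInteger start n (SquareFreeInteger start n)

-- ===== LEMMAS AND PROOFS =====

-- "m has a square divisor d*d with 2 ≤ d and d*d ≤ n", bounded so it is computable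
def pvCondB (n : Int) (m : Int) : Bool :=
  (PySem.List.pyRange 2 (n + 1) 1).any (fun d => decide (d * d ≤ n) && decide (PySem.Int.mod m (d * d) = 0))

lemma pvCondB_iff (n m : Int) :
    pvCondB n m = true ↔ ∃ d : Int, 2 ≤ d ∧ d * d ≤ n ∧ d * d ∣ m := by
  unfold pvCondB
  rw [List.any_eq_true]
  constructor
  · rintro ⟨d, hd, hp⟩
    rw [PySem.List.mem_pyRange_one] at hd
    simp only [Bool.and_eq_true, decide_eq_true_eq] at hp
    exact ⟨d, hd.1, hp.1, (PySem.Int.mod_eq_zero_iff_dvd m (d * d)).mp hp.2⟩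
  · rintro ⟨d, hd1, hd2, hd3⟩
    refine ⟨d, ?_, ?_⟩
    · rw [PySem.List.mem_pyRange_one]
      constructor
      · exact hd1
      · nlinarith
    · simp only [Bool.and_eq_true, decide_eq_true_eq]
      exact ⟨hd2, (PySem.Int.mod_eq_zero_iff_dvd m (d * d)).mpr hd3⟩

-- B-side notion of primality, purely on Int
def pvIsPrime (p : Int) : Prop := 2 ≤ p ∧ ∀ q : Int, 2 ≤ q → q < p → ¬ q ∣ p

lemma pvIsPrime_iff (p : Int) (hp : 2 ≤ p) : pvIsPrime p ↔ p.toNat.Prime := by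
  constructor
  · rintro ⟨-, h⟩
    rw [Nat.prime_def_lt]
    refine ⟨by omega, ?_⟩
    intro m hm hdvd
    by_contra hm1
    have hm0 : m ≠ 0 := by
      rintro rfl
      rw [Nat.zero_dvd] at hdvd
      omega
    have hcast : (m : Int) ∣ p := by
      have : ((m : Int)) ∣ ((p.toNat : Nat) : Int) := Int.natCast_dvd_natCast.mpr hdvd
      rwa [Int.toNat_of_nonneg (by omega)] at this
    exact h (m : Int) (by omega) (by omega) hcast
  · intro hpr
    refine ⟨hp, ?_⟩
    intro q h2 hlt hdvd
    have hqn : (q.toNat : Int) ∣ (p.toNat : Int) := by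
      rw [Int.toNat_of_nonneg (by omega : (0:Int) ≤ q), Int.toNat_of_nonneg (by omega : (0:Int) ≤ p)]
      exact hdvd
    have := (Nat.Prime.eq_one_or_self_of_dvd hpr q.toNat) (Int.natCast_dvd_natCast.mp hqn)
    omega

-- a composite i ≥ 2 has a prime divisor q with q < i and q*q ≤ i
lemma pvMinFacWitness (i : Int) (h2 : 2 ≤ i) (hnp : ¬ pvIsPrime i) :
    ∃ q : Int, pvIsPrime q ∧ q ∣ i ∧ q < i ∧ q * q ≤ i := by
  have hne1 : i.toNat ≠ 1 := by omega
  have hpr : i.toNat.minFac.Prime := Nat.minFac_prime hne1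
  have hnpr : ¬ i.toNat.Prime := fun h => hnp ((pvIsPrime_iff i h2).mpr h)
  have hsq : i.toNat.minFac * i.toNat.minFac ≤ i.toNat := by
    have h := Nat.minFac_sq_le_self (by omega : 0 < i.toNat) hnpr
    rwa [pow_two] at h
  have hsqZ : (i.toNat.minFac : Int) * (i.toNat.minFac : Int) ≤ i := by
    have h : ((i.toNat.minFac * i.toNat.minFac : Nat) : Int) ≤ ((i.toNat : Nat) : Int) := by
      exact_mod_cast hsq
    push_cast at h
    omega
  have h2q : (2 : Int) ≤ (i.toNat.minFac : Int) := by exact_mod_cast hpr.two_le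
  refine ⟨(i.toNat.minFac : Int), ?_, ?_, ?_, hsqZ⟩
  · rw [pvIsPrime_iff _ h2q]
    simpa using hpr
  · have h := Int.natCast_dvd_natCast.mpr (Nat.minFac_dvd i.toNat)
    rwa [Int.toNat_of_nonneg (by omega)] at h
  · by_contra h
    push_neg at h
    have : i * i ≤ (i.toNat.minFac : Int) * (i.toNat.minFac : Int) := by nlinarith
    nlinarith

-- pvCondB can always be witnessed by a PRIME square divisor
lemma pvCondB_prime_iff (n m : Int) :
    pvCondB n m = true ↔ ∃ p : Int, pvIsPrime p ∧ p * p ≤ n ∧ p * p ∣ m := by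
  rw [pvCondB_iff]
  constructor
  · rintro ⟨d, hd, hdn, hdm⟩
    have hne1 : d.toNat ≠ 1 := by omega
    have hpr : d.toNat.minFac.Prime := Nat.minFac_prime hne1
    have hdl : (d.toNat.minFac : Int) ∣ d := by
      have : (d.toNat.minFac : Int) ∣ ((d.toNat : Nat) : Int) := Int.natCast_dvd_natCast.mpr (Nat.minFac_dvd _)
      rwa [Int.toNat_of_nonneg (by omega)] at this
    have hle : (d.toNat.minFac : Int) ≤ d := by
      have := Nat.minFac_le (by omega : 0 < d.toNat)
      omega
    have h2q : (2 : Int) ≤ (d.toNat.minFac : Int) := by exact_mod_cast hpr.two_le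
    refine ⟨(d.toNat.minFac : Int), ?_, ?_, ?_⟩
    · rw [pvIsPrime_iff _ h2q]
      simpa using hpr
    · nlinarith
    · exact dvd_trans (mul_dvd_mul hdl hdl) hdm
  · rintro ⟨p, hp, h1, h2⟩
    exact ⟨p, hp.1, h1, h2⟩

-- characterisation of B's prime-collection loop
lemma pvBPrimes_mem (n : Int) : ∀ (fuel : Nat) (i : Int) (primes : List Int), 2 ≤ i →
    n < i + fuel →
    (∀ p : Int, p ∈ primes ↔ (pvIsPrime p ∧ p < i ∧ p * p ≤ n)) →
    ∀ p : Int, p ∈ pvBPrimes n i fuel primes ↔ (pvIsPrime p ∧ p * p ≤ n) := by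
  intro fuel
  induction fuel with
  | zero =>
    intro i primes hi hf hinv p
    rw [pvBPrimes, hinv p]
    constructor
    · rintro ⟨a, -, c⟩; exact ⟨a, c⟩
    · rintro ⟨a, c⟩
      refine ⟨a, ?_, c⟩
      have h2p : 2 ≤ p := a.1
      have : p ≤ p * p := by nlinarith
      omega
  | succ fuel ih =>
    intro i primes hi hf hinv p
    rw [pvBPrimes]
    by_cases h1 : i * i ≤ n
    · rw [if_pos h1]
      have hin : i ≤ n := by nlinarith
      refine ih (i + 1) _ (by omega) (by omega) ?_ p
      by_cases htest : primes.all (fun p => !(decide (PySem.Int.mod i p = 0))) = true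
      · rw [if_pos htest]
        have hip : pvIsPrime i := by
          by_contra hnp
          obtain ⟨q, hq, hqd, hql, hqs⟩ := pvMinFacWitness i hi hnp
          have hqmem : q ∈ primes := (hinv q).mpr ⟨hq, hql, by omega⟩
          have := List.all_eq_true.mp htest q hqmem
          simp only [Bool.not_eq_eq_eq_not, Bool.not_true, decide_eq_false_iff_not] at this
          exact this ((PySem.Int.mod_eq_zero_iff_dvd i (q : Int)).mpr hqd)
        intro r
        rw [List.mem_append, hinv r, List.mem_singleton]
        constructor
        · rintro (⟨a, b, c⟩ | rfl)
          · exact ⟨a, by omega, c⟩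
          · exact ⟨hip, by omega, h1⟩
        · rintro ⟨a, hb, c⟩
          by_cases hri : r = i
          · exact Or.inr hri
          · exact Or.inl ⟨a, by omega, c⟩
      · rw [if_neg htest]
        have hnip : ¬ pvIsPrime i := by
          intro hip
          apply htest
          rw [List.all_eq_true]
          intro q hq
          obtain ⟨hqp, hql, -⟩ := (hinv q).mp hq
          simp only [Bool.not_eq_eq_eq_not, Bool.not_true, decide_eq_false_iff_not,
            Bool.not_eq_true', decide_eq_false_iff_not]
          intro hmod
          exact hip.2 q hqp.1 hql ((PySem.Int.mod_eq_zero_iff_dvd i q).mp hmod)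
        intro r
        rw [hinv r]
        constructor
        · rintro ⟨a, b, c⟩; exact ⟨a, by omega, c⟩
        · rintro ⟨a, hb, c⟩
          refine ⟨a, ?_, c⟩
          by_cases hri : r = i
          · exact absurd (hri ▸ a) hnip
          · omega
    · rw [if_neg h1]
      rw [hinv p]
      constructor
      · rintro ⟨a, -, c⟩; exact ⟨a, c⟩
      · rintro ⟨a, c⟩
        refine ⟨a, ?_, c⟩
        have h2q : 2 ≤ p := a.1
        by_contra h
        push_neg at h
        have : i * i ≤ p * p := by nlinarith
        omega

-- membership in one ceil-range of multiples of p*p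
lemma pvRangeSq_mem (start n p m : Int) (hp : 2 ≤ p) :
    m ∈ PySem.List.pyRange (-(PySem.Int.floordiv (-start) (p * p)) * (p * p)) (n + 1) (p * p) ↔
      (start ≤ m ∧ m ≤ n ∧ (p * p) ∣ m) := by
  have hsq : (0 : Int) < p * p := by nlinarith
  set q := -(PySem.Int.floordiv (-start) (p * p)) with hq
  obtain ⟨hb1, hb2⟩ := (PySem.Int.neg_floordiv_neg_eq_iff_of_pos hsq).mp hq.symm
  have hdf : (p * p) ∣ q * (p * p) := dvd_mul_left _ _
  rw [PySem.List.mem_pyRange_iff_of_pos hsq]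
  constructor
  · rintro ⟨h1, h2, h3⟩
    refine ⟨by omega, by omega, ?_⟩
    have := Dvd.dvd.add h3 hdf
    simpa using this
  · rintro ⟨h1, h2, h3⟩
    refine ⟨?_, by omega, Dvd.dvd.sub h3 hdf⟩
    by_contra h
    push_neg at h
    have hpos : 0 < q * (p * p) - m := by omega
    have hdvd2 : (p * p) ∣ q * (p * p) - m := Dvd.dvd.sub hdf h3
    have := Int.le_of_dvd hpos hdvd2
    have hlin : (q - 1) * (p * p) = q * (p * p) - p * p := by ring
    omega

-- membership in B's bad set
lemma pvBBad_mem (start n : Int) (primes : List Int) (hpos : ∀ p ∈ primes, 2 ≤ p) (m : Int) :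
    m ∈ pvBBad start n primes ↔ ∃ p ∈ primes, start ≤ m ∧ m ≤ n ∧ (p * p) ∣ m := by
  unfold pvBBad
  have main : ∀ (ps : List Int), (∀ p ∈ ps, 2 ≤ p) → ∀ (s : PySem.Set Int),
      (m ∈ ps.foldl (fun bad p =>
        (PySem.List.pyRange (-(PySem.Int.floordiv (-start) (p * p)) * (p * p)) (n + 1) (p * p)).foldl
          (fun s j => PySem.Set.add s j) bad) s ↔
        (m ∈ s ∨ ∃ p ∈ ps, start ≤ m ∧ m ≤ n ∧ (p * p) ∣ m)) := by
    intro ps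
    induction ps with
    | nil => intro _ s; simp
    | cons p ps ihp =>
      intro hps s
      rw [List.foldl_cons, ihp (fun r hr => hps r (List.mem_cons_of_mem _ hr))]
      have hinner : m ∈ (PySem.List.pyRange (-(PySem.Int.floordiv (-start) (p * p)) * (p * p)) (n + 1) (p * p)).foldl
          (fun s j => PySem.Set.add s j) s ↔
          (m ∈ s ∨ (start ≤ m ∧ m ≤ n ∧ (p * p) ∣ m)) := by
        rw [show (fun (s : PySem.Set Int) (j : Int) => PySem.Set.add s j) =
          (fun (s : PySem.Set Int) (j : Int) => PySem.Set.add s (id j)) from rfl]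
        rw [PySem.Set.mem_foldl_add]
        constructor
        · rintro (h | ⟨j, hj, rfl⟩)
          · exact Or.inl h
          · exact Or.inr ((pvRangeSq_mem start n p m (hps p (List.mem_cons_self))).mp (by simpa using hj))
        · rintro (h | h)
          · exact Or.inl h
          · exact Or.inr ⟨m, (pvRangeSq_mem start n p m (hps p (List.mem_cons_self))).mpr h, rfl⟩
      rw [hinner]
      constructor
      · rintro ((h | h) | ⟨r, hr, hh⟩)
        · exact Or.inl h
        · exact Or.inr ⟨p, List.mem_cons_self, h⟩
        · exact Or.inr ⟨r, List.mem_cons_of_mem _ hr, hh⟩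
      · rintro (h | ⟨r, hr, hh⟩)
        · exact Or.inl (Or.inl h)
        · rw [List.mem_cons] at hr
          rcases hr with rfl | hr
          · exact Or.inl (Or.inr hh)
          · exact Or.inr ⟨r, hr, hh⟩
  rw [main primes hpos PySem.Set.empty]
  simp [PySem.Set.empty]

-- a list whose getElem? profile is 'some below N, none from N' has length N
lemma pvLength_from {L : List Int} {N : Nat} {w : Nat → Int}
    (hL : ∀ k : Nat, L[k]? = if k < N then some (w k) else none) : L.length = N := by
  rcases Nat.lt_trichotomy L.length N with h | h | h
  · have h1 := hL L.length
    rw [if_pos h, List.getElem?_eq_none_iff.mpr (le_refl _)] at h1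
    simp at h1
  · exact h
  · exfalso
    have h1 := hL N
    rw [if_neg (Nat.lt_irrefl N), List.getElem?_eq_none_iff] at h1
    omega

-- the fold of index-assignments: effect on one position
lemma pvFoldSet (start : Int) (js : List Int) :
    ∀ (L : List Int) (k : Nat),
    (js.foldl (fun acc j => if 0 ≤ j - start then acc.set (j - start).toNat 0 else acc) L)[k]? =
      if (start + (k : Int)) ∈ js ∧ k < L.length then some 0 else L[k]? := by
  induction js with
  | nil => intro L k; simp
  | cons j js ih =>
    intro L k
    rw [List.foldl_cons]
    by_cases hj : (0 : Int) ≤ j - start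
    · rw [if_pos hj, ih, List.length_set]
      by_cases hk : k < L.length
      · by_cases hmem : (start + (k : Int)) ∈ js
        · have c1 : (start + (k : Int)) ∈ js ∧ k < L.length := ⟨hmem, hk⟩
          have c2 : (start + (k : Int)) ∈ j :: js ∧ k < L.length := ⟨List.mem_cons_of_mem _ hmem, hk⟩
          rw [if_pos c1, if_pos c2]
        · have c1 : ¬ ((start + (k : Int)) ∈ js ∧ k < L.length) := fun hh => hmem hh.1
          rw [if_neg c1, List.getElem?_set]
          by_cases heq : (j - start).toNat = k
          · have hjk : j = start + (k : Int) := by omega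
            have c2 : (start + (k : Int)) ∈ j :: js ∧ k < L.length :=
              ⟨by rw [List.mem_cons]; exact Or.inl hjk.symm, hk⟩
            rw [if_pos heq, if_pos (show (j - start).toNat < L.length by omega), if_pos c2]
          · have hjk : start + (k : Int) ≠ j := by omega
            have c2 : ¬ ((start + (k : Int)) ∈ j :: js ∧ k < L.length) := by
              rintro ⟨hh, _⟩
              rw [List.mem_cons] at hh
              rcases hh with h | h
              · exact hjk h
              · exact hmem h
            rw [if_neg heq, if_neg c2]
      · have c1 : ¬ ((start + (k : Int)) ∈ js ∧ k < L.length) := fun hh => hk hh.2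
        have c2 : ¬ ((start + (k : Int)) ∈ j :: js ∧ k < L.length) := fun hh => hk hh.2
        rw [if_neg c1, if_neg c2, List.getElem?_set]
        by_cases heq : (j - start).toNat = k
        · rw [if_pos heq, if_neg (show ¬ (j - start).toNat < L.length by omega),
            List.getElem?_eq_none_iff.mpr (by omega)]
        · rw [if_neg heq]
    · rw [if_neg hj, ih]
      have hjk : start + (k : Int) ≠ j := by omega
      by_cases hk : k < L.length
      · by_cases hmem : (start + (k : Int)) ∈ js
        · have c1 : (start + (k : Int)) ∈ js ∧ k < L.length := ⟨hmem, hk⟩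
          have c2 : (start + (k : Int)) ∈ j :: js ∧ k < L.length := ⟨List.mem_cons_of_mem _ hmem, hk⟩
          rw [if_pos c1, if_pos c2]
        · have c1 : ¬ ((start + (k : Int)) ∈ js ∧ k < L.length) := fun hh => hmem hh.1
          have c2 : ¬ ((start + (k : Int)) ∈ j :: js ∧ k < L.length) := by
            rintro ⟨hh, _⟩
            rw [List.mem_cons] at hh
            rcases hh with h | h
            · exact hjk h
            · exact hmem h
          rw [if_neg c1, if_neg c2]
      · have c1 : ¬ ((start + (k : Int)) ∈ js ∧ k < L.length) := fun hh => hk hh.2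
        have c2 : ¬ ((start + (k : Int)) ∈ j :: js ∧ k < L.length) := fun hh => hk hh.2
        rw [if_neg c1, if_neg c2]

-- effect of A's inner loop on one position (p = i*i > 0)
lemma pvAInner_char (start n p : Int) (hp : 0 < p) (L : List Int) (k : Nat) :
    (pvAInner start n p L)[k]? =
      if (start + (k : Int) ≤ n ∧ p ∣ (start + (k : Int))) ∧ k < L.length then some 0 else L[k]? := by
  unfold pvAInner
  rw [pvFoldSet]
  have hfd : PySem.Int.floordiv start p * p ≤ start := by
    rw [PySem.Int.floordiv_eq_ediv_of_pos hp]
    exact Int.ediv_mul_le start (by omega)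
  have hdvd : p ∣ PySem.Int.floordiv start p * p := dvd_mul_left p _
  have hmem : (start + (k : Int)) ∈ PySem.List.pyRange (PySem.Int.floordiv start p * p) (n + 1) p
      ↔ (start + (k : Int) ≤ n ∧ p ∣ (start + (k : Int))) := by
    rw [PySem.List.mem_pyRange_iff_of_pos hp]
    constructor
    · rintro ⟨_, h2, h3⟩
      refine ⟨by omega, ?_⟩
      have := Dvd.dvd.add h3 hdvd
      simpa using this
    · rintro ⟨h1, h2⟩
      exact ⟨by omega, by omega, Dvd.dvd.sub h2 hdvd⟩
  simp only [hmem]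

-- the loop invariant expressed at an exit point of A's outer loop
lemma pvExit (start n i : Int) (hi : 2 ≤ i)
    (hmono : ∀ d : Int, 2 ≤ d → d < i → d * d ≤ n) (hgt : ¬ i * i ≤ n) (k : Nat) :
    (if k < (n + 1 - start).toNat then
        some (if (PySem.List.pyRange 2 i 1).any
          (fun d => decide (PySem.Int.mod (start + (k : Int)) (d * d) = 0)) then (0 : Int) else 1) else none) =
      if k < (n + 1 - start).toNat then some (if pvCondB n (start + (k : Int)) then 0 else 1) else none := by
  by_cases hk : k < (n + 1 - start).toNat
  · rw [if_pos hk]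
    have hiff : ((PySem.List.pyRange 2 i 1).any
          (fun d => decide (PySem.Int.mod (start + (k : Int)) (d * d) = 0))) =
        pvCondB n (start + (k : Int)) := by
      rw [Bool.eq_iff_iff, List.any_eq_true, pvCondB_iff]
      constructor
      · rintro ⟨d, hd, hdd⟩
        rw [PySem.List.mem_pyRange_one] at hd
        simp only [decide_eq_true_eq] at hdd
        exact ⟨d, hd.1, hmono d hd.1 hd.2, (PySem.Int.mod_eq_zero_iff_dvd _ _).mp hdd⟩
      · rintro ⟨d, hd1, hd2, hd3⟩
        refine ⟨d, ?_, ?_⟩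
        · rw [PySem.List.mem_pyRange_one]
          refine ⟨hd1, ?_⟩
          by_contra h
          have : i * i ≤ d * d := by nlinarith
          omega
        · simp only [decide_eq_true_eq]
          exact (PySem.Int.mod_eq_zero_iff_dvd _ _).mpr hd3
    rw [hiff, if_pos hk]
  · rw [if_neg hk, if_neg hk]

-- characterisation of A's outer loop
lemma pvALoop_char (start n : Int) : ∀ (fuel : Nat) (i : Int) (L : List Int), 2 ≤ i →
    n < i + fuel →
    (∀ d : Int, 2 ≤ d → d < i → d * d ≤ n) →
    (∀ k : Nat, L[k]? = if k < (n + 1 - start).toNat then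
        some (if (PySem.List.pyRange 2 i 1).any
          (fun d => decide (PySem.Int.mod (start + (k : Int)) (d * d) = 0)) then 0 else 1) else none) →
    ∀ k : Nat, (pvALoop start n i fuel L)[k]? =
      if k < (n + 1 - start).toNat then some (if pvCondB n (start + (k : Int)) then 0 else 1) else none := by
  intro fuel
  induction fuel with
  | zero =>
    intro i L hi hfuel hmono hL k
    have hgt : ¬ i * i ≤ n := by
      intro hh
      have : i ≤ i * i := by nlinarith
      omega
    rw [pvALoop, hL k, pvExit start n i hi hmono hgt k]
  | succ fuel ih =>
    intro i L hi hfuel hmono hL k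
    have hlen : L.length = (n + 1 - start).toNat := pvLength_from hL
    rw [pvALoop]
    by_cases h1 : i * i ≤ n
    · rw [if_pos h1]
      refine ih (i + 1) _ (by omega) (by omega) ?_ ?_ k
      · intro d hd1 hd2
        rcases lt_or_ge d i with h | h
        · exact hmono d hd1 h
        · have : d = i := by omega
          subst this; exact h1
      · intro k'
        have hpos : 0 < i * i := by nlinarith
        rw [pvAInner_char start n (i * i) hpos L k', hL k', hlen]
        by_cases hk : k' < (n + 1 - start).toNat
        · have hle : start + (k' : Int) ≤ n := by omega
          rw [if_pos hk]
          by_cases hidvd : (i * i) ∣ (start + (k' : Int))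
          · rw [if_pos (show (start + (k' : Int) ≤ n ∧ (i * i) ∣ (start + (k' : Int)))
                ∧ k' < (n + 1 - start).toNat from ⟨⟨hle, hidvd⟩, hk⟩)]
            have hany : (PySem.List.pyRange 2 (i + 1) 1).any
                (fun d => decide (PySem.Int.mod (start + (k' : Int)) (d * d) = 0)) = true := by
              rw [List.any_eq_true]
              refine ⟨i, ?_, ?_⟩
              · rw [PySem.List.mem_pyRange_one]; omega
              · simp only [decide_eq_true_eq]
                exact (PySem.Int.mod_eq_zero_iff_dvd _ _).mpr hidvd
            rw [hany, if_pos rfl, if_pos hk]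
          · rw [if_neg (show ¬ ((start + (k' : Int) ≤ n ∧ (i * i) ∣ (start + (k' : Int)))
                ∧ k' < (n + 1 - start).toNat) from fun hh => hidvd hh.1.2)]
            have hany : (PySem.List.pyRange 2 (i + 1) 1).any
                (fun d => decide (PySem.Int.mod (start + (k' : Int)) (d * d) = 0)) =
                (PySem.List.pyRange 2 i 1).any
                (fun d => decide (PySem.Int.mod (start + (k' : Int)) (d * d) = 0)) := by
              rw [PySem.List.pyRange_one_succ_right (by omega : (2 : Int) ≤ i), List.any_append]
              have hi2 : (List.any [i] fun d => decide (PySem.Int.mod (start + (k' : Int)) (d * d) = 0)) = false := by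
                simp only [List.any_cons, List.any_nil, Bool.or_false, decide_eq_false_iff_not]
                intro hh
                exact hidvd ((PySem.Int.mod_eq_zero_iff_dvd _ _).mp hh)
              rw [hi2, Bool.or_false]
            rw [hany, if_pos hk]
        · rw [if_neg (show ¬ ((start + (k' : Int) ≤ n ∧ (i * i) ∣ (start + (k' : Int)))
              ∧ k' < (n + 1 - start).toNat) from fun hh => hk hh.2), if_neg hk, if_neg hk]
    · rw [if_neg h1, hL k, pvExit start n i hi hmono h1 k]

-- the two bodies agree
lemma pvBody_eq (start n : Int) : pvABody start n = pvBBody start n := by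
  apply List.ext_getElem?
  intro k
  have hprimes : ∀ p : Int, p ∈ pvBPrimes n 2 n.toNat [] ↔ (pvIsPrime p ∧ p * p ≤ n) := by
    refine pvBPrimes_mem n n.toNat 2 [] (by omega) (by omega) ?_
    intro p
    simp only [List.not_mem_nil, false_iff]
    rintro ⟨⟨h2, -⟩, hlt, -⟩
    omega
  have hpos : ∀ p ∈ pvBPrimes n 2 n.toNat [], 2 ≤ p := fun p hp => ((hprimes p).mp hp).1.1
  have hB : (pvBBody start n)[k]? =
      if k < (n + 1 - start).toNat then some (if pvCondB n (start + (k : Int)) then 0 else 1) else none := by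
    show ((PySem.List.pyRange start (n + 1) 1).map
      (fun m => if m ∈ pvBBad start n (pvBPrimes n 2 n.toNat []) then 0 else 1))[k]? = _
    rw [List.getElem?_map, PySem.List.getElem?_pyRange_one]
    by_cases hk : k < (n + 1 - start).toNat
    · rw [if_pos hk, if_pos hk]
      simp only [Option.map_some]
      have hiff : (start + (k : Int)) ∈ pvBBad start n (pvBPrimes n 2 n.toNat []) ↔
          pvCondB n (start + (k : Int)) = true := by
        rw [pvBBad_mem start n _ hpos, pvCondB_prime_iff]
        constructor
        · rintro ⟨p, hp, -, -, hd⟩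
          exact ⟨p, ((hprimes p).mp hp).1, ((hprimes p).mp hp).2, hd⟩
        · rintro ⟨p, h1, h2, h3⟩
          exact ⟨p, (hprimes p).mpr ⟨h1, h2⟩, by omega, by omega, h3⟩
      by_cases hmem : (start + (k : Int)) ∈ pvBBad start n (pvBPrimes n 2 n.toNat [])
      · rw [if_pos hmem, hiff.mp hmem, if_pos rfl]
      · rw [if_neg hmem, if_neg (by rw [← hiff] at *; simpa using hmem)]
    · rw [if_neg hk, if_neg hk]
      rfl
  have hA : (pvABody start n)[k]? =
      if k < (n + 1 - start).toNat then some (if pvCondB n (start + (k : Int)) then 0 else 1) else none := by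
    unfold pvABody
    refine pvALoop_char start n n.toNat 2 _ (by omega) (by omega) (by intro d h1 h2; omega) ?_ k
    intro k'
    have hr : PySem.List.pyRange (2 : Int) 2 1 = [] := PySem.List.pyRange_one_eq_nil (by omega)
    by_cases hk' : k' < (n - start + 1).toNat
    · rw [List.getElem?_replicate, if_pos hk', if_pos (by omega), hr]
      rfl
    · rw [List.getElem?_eq_none_iff.mpr (by simp; omega), if_neg (by omega)]
  rw [hA, hB]

-- ===== VERDICT (by name: the statement is the Claim_ definition above) =====
theorem SquareFreeInteger_spec : Claim_equal_SquareFreeInteger := by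
  intro start n _
  unfold Spec_SquareFreeInteger SquareFreeInteger SquareFreeInteger_alt
  split_ifs <;> apply pvBody_eq
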